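-- pv_equiv track=rewrite | github.com/ndouglas/CryptoPals | break_repeating_key_xor.py | get_best_key
-- ===== SOURCE A (Python) =====
-- def score_string(str):
--     result = 0
--     for char in str.lower():
--         if char == 'e':
--             result += 12
--         elif char == 't':
--             result += 9
--         elif char in ['a', 'i', 'o', 'n', 's']:
--             result += 8
--         elif char in ['h', 'r']:
--             result += 6
--         elif char in ['d', 'l', 'u']:
--             result += 4
--         elif char in ['c', 'f']:
--             result += 3
--         elif char in ['w', 'y', 'g', 'p', 'b']:
--             result += 2
--         elif char in ['v', 'k', 'q', 'j', 'x', 'z']: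
--             result += 1
--         elif char in ['\'', ',', '.', ' ', ':', '"', '-']:
--             result += 0
--         else:
--             result -= 10
--     return result
--
-- def get_best_key(keys):
--     best_key = None
--     best_key_score = 0
--     for key in keys:
--         key_score = score_string(key)
--         if key_score > best_key_score:
--             best_key = key
--             best_key_score = key_score
--     return best_key
-- ===== SOURCE B (Python) =====
-- _WEIGHTS = {
--     'e': 12, 't': 9,
--     'a': 8, 'i': 8, 'o': 8, 'n': 8, 's': 8,
--     'h': 6, 'r': 6,
--     'd': 4, 'l': 4, 'u': 4,
--     'c': 3, 'f': 3,
--     'w': 2, 'y': 2, 'g': 2, 'p': 2, 'b': 2,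
--     'v': 1, 'k': 1, 'q': 1, 'j': 1, 'x': 1, 'z': 1,
--     '\'': 0, ',': 0, '.': 0, ' ': 0, ':': 0, '"': 0, '-': 0,
-- }
--
-- def _score(s):
--     return sum(_WEIGHTS.get(ch, -10) for ch in s.lower())
--
-- def get_best_key(keys):
--     scores = [_score(k) for k in keys]
--     best = max(scores, default=0)
--     if best <= 0:
--         return None
--     return keys[scores.index(best)]
-- ===== Notes on version B (the rewrite author's own statement) =====
-- stated objective: alternative
-- what changed: score_string's per-character if-elif cascade becomes a sum of weight-table lookups, and get_best_key's running-best accumulator loop becomes compute-all-scores, take max (default 0), then return the key at the first index of the max if it is positive.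
import Mathlib
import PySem

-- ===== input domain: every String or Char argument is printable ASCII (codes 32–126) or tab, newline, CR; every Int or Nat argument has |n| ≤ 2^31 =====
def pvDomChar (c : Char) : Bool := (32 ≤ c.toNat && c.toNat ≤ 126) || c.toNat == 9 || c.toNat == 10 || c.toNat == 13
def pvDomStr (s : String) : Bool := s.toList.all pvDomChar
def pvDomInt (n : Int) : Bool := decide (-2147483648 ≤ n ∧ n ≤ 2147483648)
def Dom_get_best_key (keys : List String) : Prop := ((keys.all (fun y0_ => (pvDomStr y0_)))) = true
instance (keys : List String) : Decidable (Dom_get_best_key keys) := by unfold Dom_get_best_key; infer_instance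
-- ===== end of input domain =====

-- B replaces A's per-character if-elif scoring cascade by a weight-table lookup summed over the
-- lowered string, and replaces A's running-best selection loop by score-list + max + first-index
-- (objective: alternative decomposition, same asymptotic cost).

-- ===== PORT A =====
def score_string (str : String) : Int :=
  (PySem.Str.lower str).toList.foldl (fun result char =>
    if char = 'e' then result + 12
    else if char = 't' then result + 9
    else if char ∈ ['a', 'i', 'o', 'n', 's'] then result + 8
    else if char ∈ ['h', 'r'] then result + 6
    else if char ∈ ['d', 'l', 'u'] then result + 4
    else if char ∈ ['c', 'f'] then result + 3
    else if char ∈ ['w', 'y', 'g', 'p', 'b'] then result + 2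
    else if char ∈ ['v', 'k', 'q', 'j', 'x', 'z'] then result + 1
    else if char ∈ ['\'', ',', '.', ' ', ':', '"', '-'] then result + 0
    else result - 10) 0

def get_best_key (keys : List String) : Option String :=
  (keys.foldl (fun (st : Option String × Int) key =>
    let key_score := score_string key
    if key_score > st.2 then (some key, key_score) else st) (none, 0)).1

-- ===== PORT B =====
def pvWeights : PySem.Dict Char Int := PySem.Dict.ofList
  [('e', 12), ('t', 9),
   ('a', 8), ('i', 8), ('o', 8), ('n', 8), ('s', 8),
   ('h', 6), ('r', 6),
   ('d', 4), ('l', 4), ('u', 4),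
   ('c', 3), ('f', 3),
   ('w', 2), ('y', 2), ('g', 2), ('p', 2), ('b', 2),
   ('v', 1), ('k', 1), ('q', 1), ('j', 1), ('x', 1), ('z', 1),
   ('\'', 0), (',', 0), ('.', 0), (' ', 0), (':', 0), ('"', 0), ('-', 0)]

def score_alt (s : String) : Int :=
  ((PySem.Str.lower s).toList.map (fun ch => pvWeights.getD ch (-10))).sum

def get_best_key_alt (keys : List String) : Option String :=
  let scores := keys.map score_alt
  let best := PySem.List.maxD scores (fun y => y) 0
  if best ≤ 0 then none
  else (PySem.List.index? scores best).bind (fun i => PySem.List.pyGet? keys (i : Int))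

-- ===== PRECONDITION & SPEC =====
def Spec_get_best_key (keys : List String) (out : Option String) : Prop := out = get_best_key_alt keys
instance (keys : List String) (out : Option String) : Decidable (Spec_get_best_key keys out) := by unfold Spec_get_best_key; infer_instance

-- ===== CLAIM (what is proved, stated in full; the proofs are below) =====
def Claim_equal_get_best_key : Prop := ∀ (keys : List String), Dom_get_best_key keys → Spec_get_best_key keys (get_best_key keys)

-- ===== LEMMAS AND PROOFS =====
set_option maxHeartbeats 1000000

-- A's cascade, per character, as a pure value.
def pvDelta (c : Char) : Int :=
  if c = 'e' then 12
  else if c = 't' then 9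
  else if c ∈ ['a', 'i', 'o', 'n', 's'] then 8
  else if c ∈ ['h', 'r'] then 6
  else if c ∈ ['d', 'l', 'u'] then 4
  else if c ∈ ['c', 'f'] then 3
  else if c ∈ ['w', 'y', 'g', 'p', 'b'] then 2
  else if c ∈ ['v', 'k', 'q', 'j', 'x', 'z'] then 1
  else if c ∈ ['\'', ',', '.', ' ', ':', '"', '-'] then 0
  else -10

-- A's per-character cascade yields exactly the weight B looks up in the table.
lemma pv_delta_eq (c : Char) : pvDelta c = pvWeights.getD c (-10) := by
  by_cases hc : c ∈ ['e','t','a','i','o','n','s','h','r','d','l','u','c','f','w','y','g','p','b','v','k','q','j','x','z','\'',',','.',' ',':','"','-']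
  · fin_cases hc <;> decide
  · simp only [List.mem_cons, List.not_mem_nil, or_false, not_or] at hc
    obtain ⟨h1,h2,h3,h4,h5,h6,h7,h8,h9,h10,h11,h12,h13,h14,h15,h16,h17,h18,h19,h20,h21,h22,h23,h24,h25,h26,h27,h28,h29,h30,h31,h32⟩ := hc
    have hw : pvWeights = PySem.Dict.mk
      [('e', 12), ('t', 9),
       ('a', 8), ('i', 8), ('o', 8), ('n', 8), ('s', 8),
       ('h', 6), ('r', 6),
       ('d', 4), ('l', 4), ('u', 4),
       ('c', 3), ('f', 3),
       ('w', 2), ('y', 2), ('g', 2), ('p', 2), ('b', 2),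
       ('v', 1), ('k', 1), ('q', 1), ('j', 1), ('x', 1), ('z', 1),
       ('\'', 0), (',', 0), ('.', 0), (' ', 0), (':', 0), ('"', 0), ('-', 0)] := by decide
    have hg : pvWeights.get? c = none := by
      simp [hw, Ne.symm h1, Ne.symm h2, Ne.symm h3, Ne.symm h4, Ne.symm h5,
        Ne.symm h6, Ne.symm h7, Ne.symm h8, Ne.symm h9, Ne.symm h10, Ne.symm h11, Ne.symm h12,
        Ne.symm h13, Ne.symm h14, Ne.symm h15, Ne.symm h16, Ne.symm h17, Ne.symm h18, Ne.symm h19,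
        Ne.symm h20, Ne.symm h21, Ne.symm h22, Ne.symm h23, Ne.symm h24, Ne.symm h25, Ne.symm h26,
        Ne.symm h27, Ne.symm h28, Ne.symm h29, Ne.symm h30, Ne.symm h31, Ne.symm h32,
        PySem.Dict.get?]
    simp [pvDelta, PySem.Dict.getD, hg, h1,h2,h3,h4,h5,h6,h7,h8,h9,h10,h11,h12,h13,h14,h15,h16,
      h17,h18,h19,h20,h21,h22,h23,h24,h25,h26,h27,h28,h29,h30,h31,h32]

lemma pv_score_fold (cs : List Char) (r : Int) :
    cs.foldl (fun result char =>
      if char = 'e' then result + 12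
      else if char = 't' then result + 9
      else if char ∈ ['a', 'i', 'o', 'n', 's'] then result + 8
      else if char ∈ ['h', 'r'] then result + 6
      else if char ∈ ['d', 'l', 'u'] then result + 4
      else if char ∈ ['c', 'f'] then result + 3
      else if char ∈ ['w', 'y', 'g', 'p', 'b'] then result + 2
      else if char ∈ ['v', 'k', 'q', 'j', 'x', 'z'] then result + 1
      else if char ∈ ['\'', ',', '.', ' ', ':', '"', '-'] then result + 0
      else result - 10) r
    = r + (cs.map (fun ch => pvWeights.getD ch (-10))).sum := by
  induction cs generalizing r with
  | nil => simp
  | cons c cs ih =>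
    have hstep : (if c = 'e' then r + 12
      else if c = 't' then r + 9
      else if c ∈ ['a', 'i', 'o', 'n', 's'] then r + 8
      else if c ∈ ['h', 'r'] then r + 6
      else if c ∈ ['d', 'l', 'u'] then r + 4
      else if c ∈ ['c', 'f'] then r + 3
      else if c ∈ ['w', 'y', 'g', 'p', 'b'] then r + 2
      else if c ∈ ['v', 'k', 'q', 'j', 'x', 'z'] then r + 1
      else if c ∈ ['\'', ',', '.', ' ', ':', '"', '-'] then r + 0
      else r - 10) = r + pvDelta c := by
      simp only [pvDelta]; split_ifs <;> ring
    simp only [List.foldl_cons, List.map_cons, List.sum_cons, hstep, ih, pv_delta_eq]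
    ring

lemma pv_score_eq (s : String) : score_string s = score_alt s := by
  simp only [score_string, score_alt, pv_score_fold, zero_add]

-- pvPick: the common recursive characterisation ("last strict record-breaker above threshold m").
def pvPick : List String → Int → Option String
  | [], _ => none
  | k :: ks, m =>
    if score_alt k > m then some ((pvPick ks (score_alt k)).getD k) else pvPick ks m

-- B's pipeline at an arbitrary threshold m (B's code is pvPipe at m = 0).
def pvPipe (keys : List String) (m : Int) : Option String :=
  if PySem.List.maxD (keys.map score_alt) (fun y => y) m ≤ m then none
  else (PySem.List.index? (keys.map score_alt)
          (PySem.List.maxD (keys.map score_alt) (fun y => y) m)).bind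
         (fun i => PySem.List.pyGet? keys (i : Int))

lemma pv_foldl_max_le (t : List Int) (a s : Int) (ha : a ≤ s) (ht : ∀ y ∈ t, y ≤ s) :
    List.foldl max a t ≤ s := by
  induction t generalizing a with
  | nil => simpa using ha
  | cons x xs ih =>
    simp only [List.foldl_cons]
    exact ih (max a x) (max_le ha (ht x (by simp))) (fun y hy => ht y (by simp [hy]))

lemma pv_foldl_max_pull (t : List Int) (a b : Int) :
    List.foldl max (max a b) t = max a (List.foldl max b t) := by
  induction t generalizing b with
  | nil => simp
  | cons x xs ih => simp only [List.foldl_cons, max_assoc, ih]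

lemma pv_A_fold (keys : List String) (b : Option String) (m : Int) :
    (keys.foldl (fun (st : Option String × Int) key =>
      let key_score := score_string key
      if key_score > st.2 then (some key, key_score) else st) (b, m)).1
    = (pvPick keys m).or b := by
  induction keys generalizing b m with
  | nil => simp [pvPick]
  | cons k ks ih =>
    rw [List.foldl_cons]
    simp only [pv_score_eq k]
    by_cases h : score_alt k > m
    · rw [if_pos (show score_alt k > (b, m).2 from h), ih, pvPick, if_pos h]
      cases hp : pvPick ks (score_alt k) <;> simp [Option.or]
    · rw [if_neg (show ¬ score_alt k > (b, m).2 from h), ih, pvPick, if_neg h]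

lemma pv_foldl_max_mem (t : List Int) (a : Int) : List.foldl max a t ∈ a :: t := by
  induction t generalizing a with
  | nil => simp
  | cons x xs ih =>
    simp only [List.foldl_cons]
    rcases List.mem_cons.1 (ih (max a x)) with h | h
    · rcases max_choice a x with h2 | h2 <;> rw [h, h2] <;> simp
    · simp [h]

lemma pv_maxD_cons (x : Int) (t : List Int) (m : Int) :
    PySem.List.maxD (x :: t) (fun y => y) m = t.foldl max x := by
  simp [PySem.List.maxD, PySem.List.max?_id_cons]

lemma pv_pipe_eq_pick (keys : List String) (m : Int) : pvPipe keys m = pvPick keys m := by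
  induction keys generalizing m with
  | nil => simp [pvPipe, pvPick, PySem.List.maxD, PySem.List.max?]
  | cons k ks ih =>
    simp only [pvPipe, List.map_cons, pv_maxD_cons]
    by_cases hs : score_alt k > m
    · have hsM := (PySem.List.le_foldl_max (ks.map score_alt) (score_alt k)).1
      rw [if_neg (not_le.mpr (lt_of_lt_of_le hs hsM)), pvPick, if_pos hs]
      by_cases hall : ∀ y ∈ ks.map score_alt, y ≤ score_alt k
      · have hMs : (ks.map score_alt).foldl max (score_alt k) = score_alt k :=
          le_antisymm (pv_foldl_max_le _ _ _ le_rfl hall) hsM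
        have hnone : pvPick ks (score_alt k) = none := by
          rw [← ih]
          cases hks : ks with
          | nil => simp [pvPipe, PySem.List.maxD, PySem.List.max?]
          | cons k2 ks2 =>
            have hr : ∀ y ∈ (k2 :: ks2).map score_alt, y ≤ score_alt k := by
              rw [← hks]; exact hall
            simp only [pvPipe, List.map_cons, pv_maxD_cons]
            rw [if_pos (pv_foldl_max_le _ _ _ (hr _ (by simp)) (fun y hy => hr y (by simp [hy])))]
        rw [hMs, PySem.List.index?_cons_self, hnone]
        simp [PySem.List.pyGet?_natCast]
      · simp only [not_forall, not_le] at hall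
        obtain ⟨y, hy, hys⟩ := hall
        cases hks : ks with
        | nil => rw [hks] at hy; simp at hy
        | cons k2 ks2 =>
          subst hks
          simp only [List.map_cons] at hy ⊢
          set r := score_alt k2
          set t := ks2.map score_alt
          have hyMr : y ≤ t.foldl max r := by
            rcases List.mem_cons.1 hy with h | hyt
            · exact h ▸ (PySem.List.le_foldl_max t r).1
            · exact (PySem.List.le_foldl_max t r).2 y hyt
          have hsMr : score_alt k < t.foldl max r := lt_of_lt_of_le hys hyMr
          have hM : (r :: t).foldl max (score_alt k) = t.foldl max r := by
            rw [List.foldl_cons, pv_foldl_max_pull]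
            exact max_eq_right (le_of_lt hsMr)
          rw [hM, PySem.List.index?_cons_of_ne _ (ne_of_lt hsMr)]
          have hRHS : pvPick (k2 :: ks2) (score_alt k) =
              (PySem.List.index? (r :: t) (t.foldl max r)).bind
                (fun i => PySem.List.pyGet? (k2 :: ks2) (i : Int)) := by
            rw [← ih]
            simp only [pvPipe, List.map_cons, pv_maxD_cons]
            rw [if_neg (not_le.mpr hsMr)]
          obtain ⟨j, hidx⟩ := Option.isSome_iff_exists.mp
            ((PySem.List.index?_isSome_iff (r :: t) (t.foldl max r)).2 (pv_foldl_max_mem t r))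
          obtain ⟨hjlt, -, -⟩ := PySem.List.getElem_of_index?_eq_some hidx
          have hjlt' : j < (k2 :: ks2).length := by
            simpa [t] using hjlt
          rw [hRHS, hidx]
          simp [PySem.List.pyGet?_natCast, List.getElem?_eq_getElem hjlt']
    · rw [pvPick, if_neg hs]
      cases hks : ks with
      | nil =>
        simp only [List.map_nil, List.foldl_nil]
        rw [if_pos (not_lt.mp hs)]
        simp [pvPick]
      | cons k2 ks2 =>
        subst hks
        simp only [List.map_cons]
        set r := score_alt k2
        set t := ks2.map score_alt
        rw [List.foldl_cons, pv_foldl_max_pull]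
        by_cases hMr : t.foldl max r ≤ m
        · rw [if_pos (max_le (not_lt.mp hs) hMr), ← ih]
          simp only [pvPipe, List.map_cons, pv_maxD_cons]
          rw [if_pos hMr]
        · have hmlt : m < t.foldl max r := not_le.mp hMr
          have hMeq : max (score_alt k) (t.foldl max r) = t.foldl max r :=
            max_eq_right (le_trans (not_lt.mp hs) (le_of_lt hmlt))
          rw [hMeq, if_neg hMr,
            PySem.List.index?_cons_of_ne _ (ne_of_lt (lt_of_le_of_lt (not_lt.mp hs) hmlt))]
          rw [← ih]
          simp only [pvPipe, List.map_cons, pv_maxD_cons]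
          rw [if_neg hMr]
          cases hidx : PySem.List.index? (r :: t) (t.foldl max r) with
          | none => simp
          | some j => simp [PySem.List.pyGet?_natCast]

-- ===== VERDICT (by name: the statement is the Claim_ definition above) =====
theorem get_best_key_spec : Claim_equal_get_best_key := by
  intro keys _
  show get_best_key keys = get_best_key_alt keys
  have hA : get_best_key keys = pvPick keys 0 := by
    rw [get_best_key, pv_A_fold, Option.or_none]
  have hB : get_best_key_alt keys = pvPipe keys 0 := rfl
  rw [hA, hB, pv_pipe_eq_pick]
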